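-- pv_equiv track=rewrite | github.com/Tenjouille/piscine-Django | Day01/ex05/all_in.py | state
-- ===== SOURCE A (Python) =====
-- def	cap_states_lists():
-- 	states = {
-- 		"Oregon" : "OR",
-- 		"Alabama" : "AL",
-- 		"New Jersey": "NJ",
-- 		"Colorado" : "CO"
-- 	}
-- 	capital_cities = {
-- 		"OR": "Salem",
-- 		"AL": "Montgomery",
-- 		"NJ": "Trenton",
-- 		"CO": "Denver"
-- 	}
-- 	return (states, capital_cities)
--
-- def state(capital : str):
-- 	states, capital_cities = cap_states_lists()
-- 	reverse_states = {y : x for x, y in states.items()}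
-- 	capital_cities_upper = {y.upper() : x.upper() for x, y in capital_cities.items()}
-- 	key_res = capital_cities_upper.get(capital, None)
-- 	if key_res == None:
-- 		return(None)
-- 	return (capital_cities[key_res], reverse_states[key_res])
-- ===== SOURCE B (Python) =====
-- def	cap_states_lists():
-- 	states = {
-- 		"Oregon" : "OR",
-- 		"Alabama" : "AL",
-- 		"New Jersey": "NJ",
-- 		"Colorado" : "CO"
-- 	}
-- 	capital_cities = {
-- 		"OR": "Salem",
-- 		"AL": "Montgomery",
-- 		"NJ": "Trenton",
-- 		"CO": "Denver"
-- 	}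
-- 	return (states, capital_cities)
--
-- def state(capital : str):
-- 	states, capital_cities = cap_states_lists()
-- 	for abbr, cap in capital_cities.items():
-- 		if cap.upper() == capital:
-- 			for state_name, ab in states.items():
-- 				if ab == abbr:
-- 					return (cap, state_name)
-- 	return None
-- ===== Notes on version B (the rewrite author's own statement) =====
-- stated objective: simpler
-- what changed: Builds no dictionaries at all: a direct linear scan over capital_cities compares each capital uppercased against the argument with early return, and a nested scan over states recovers the state name, replacing A's construction of two derived lookup tables and its get-then-two-lookups chain.
import Mathlib
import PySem

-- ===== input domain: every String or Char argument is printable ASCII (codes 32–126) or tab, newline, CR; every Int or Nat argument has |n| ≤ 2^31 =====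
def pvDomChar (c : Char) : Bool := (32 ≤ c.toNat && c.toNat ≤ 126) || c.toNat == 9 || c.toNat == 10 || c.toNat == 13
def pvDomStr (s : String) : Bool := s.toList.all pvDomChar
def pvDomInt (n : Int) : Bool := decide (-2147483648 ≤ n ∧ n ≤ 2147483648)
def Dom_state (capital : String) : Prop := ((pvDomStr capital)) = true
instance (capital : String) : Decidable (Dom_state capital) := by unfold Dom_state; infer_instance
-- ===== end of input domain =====

-- B drops the derived lookup tables entirely: a direct linear scan with early return over the data.

-- ===== PORT A =====
-- shared data helper (both Pythons define the identical cap_states_lists)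
def cap_states_lists : PySem.Dict String String × PySem.Dict String String :=
  (PySem.Dict.ofList [("Oregon","OR"),("Alabama","AL"),("New Jersey","NJ"),("Colorado","CO")],
   PySem.Dict.ofList [("OR","Salem"),("AL","Montgomery"),("NJ","Trenton"),("CO","Denver")])

def state (capital : String) : Option (String × String) :=
  let states := cap_states_lists.1
  let capital_cities := cap_states_lists.2
  let reverse_states := PySem.Dict.ofList (states.items.map (fun p => (p.2, p.1)))
  let capital_cities_upper :=
    PySem.Dict.ofList (capital_cities.items.map (fun p => (PySem.Str.upper p.2, PySem.Str.upper p.1)))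
  match capital_cities_upper.get? capital with
  | none => none
  -- Python's capital_cities[key_res] / reverse_states[key_res]: KeyError is unreachable for
  -- these literal dicts (key_res is always an abbreviation present in both), so getD "" is exact.
  | some key_res => some (capital_cities.getD key_res "", reverse_states.getD key_res "")

-- ===== PORT B =====
-- inner `for state_name, ab in states.items(): if ab == abbr: return (cap, state_name)` (falls through to the outer loop on no match)
def stateAltInner (abbr cap : String) : List (String × String) → Option (String × String)
  | [] => none
  | (state_name, ab) :: rest =>
      if ab == abbr then some (cap, state_name) else stateAltInner abbr cap rest

-- outer `for abbr, cap in capital_cities.items(): if cap.upper() == capital: …` with early return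
def stateAltOuter (capital : String) (states : List (String × String)) :
    List (String × String) → Option (String × String)
  | [] => none
  | (abbr, cap) :: rest =>
      if PySem.Str.upper cap == capital then
        match stateAltInner abbr cap states with
        | some r => some r
        | none => stateAltOuter capital states rest
      else stateAltOuter capital states rest

def state_alt (capital : String) : Option (String × String) :=
  let states := cap_states_lists.1
  let capital_cities := cap_states_lists.2
  stateAltOuter capital states.items capital_cities.items

-- ===== PRECONDITION & SPEC =====
def Spec_state (capital : String) (out : Option (String × String)) : Prop := out = state_alt capital
instance (capital : String) (out : Option (String × String)) : Decidable (Spec_state capital out) := by unfold Spec_state; infer_instance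

-- ===== CLAIM (what is proved, stated in full; the proofs are below) =====
def Claim_equal_state : Prop := ∀ (capital : String), Dom_state capital → Spec_state capital (state capital)

-- ===== LEMMAS AND PROOFS =====
-- B's scan is over closed lists; unfolding it leaves a chain of ifs on `c` against four literals.
lemma state_alt_eq_ifs (c : String) : state_alt c =
    (if ("SALEM" : String) == c then some (("Salem","Oregon") : String × String)
     else if ("MONTGOMERY" : String) == c then some ("Montgomery","Alabama")
     else if ("TRENTON" : String) == c then some ("Trenton","New Jersey")
     else if ("DENVER" : String) == c then some ("Denver","Colorado")
     else none) := rfl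

-- A's three closed dicts evaluate; only the match on `c`'s lookup in the literal upper table remains.
lemma state_eq_match (c : String) : state c =
    (match (PySem.Dict.mk [("SALEM","OR"),("MONTGOMERY","AL"),("TRENTON","NJ"),("DENVER","CO")]).get? c with
     | none => none
     | some k => some ((PySem.Dict.mk [("OR","Salem"),("AL","Montgomery"),("NJ","Trenton"),("CO","Denver")]).getD k "",
         (PySem.Dict.mk [("OR","Oregon"),("AL","Alabama"),("NJ","New Jersey"),("CO","Colorado")]).getD k "")) := rfl

-- ===== VERDICT (by name: the statement is the Claim_ definition above) =====
theorem state_spec : Claim_equal_state := by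
  intro c _
  unfold Spec_state
  rw [state_eq_match, state_alt_eq_ifs]
  simp only [PySem.Dict.get?_mk_cons]
  split_ifs <;> rfl
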